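-- pv_equiv track=rewrite | github.com/Ali-Choubdaran/corporate-news-extraction | news_url_extractor.py | _find_twin_and_intersections
-- ===== SOURCE A (Python) =====
-- def _find_twin_and_intersections(group_idx, all_urls_sets):
--     """Find if group has twins or intersecting URLs"""
--     current_set = all_urls_sets[group_idx]
--     has_twin = has_intersection = False
--
--     for other_idx, other_set in enumerate(all_urls_sets):
--         if other_idx != group_idx:
--             if current_set == other_set:
--                 has_twin = True
--             if current_set.intersection(other_set):
--                 has_intersection = True
--             if has_twin and has_intersection:
--                 break
--     return has_twin, has_intersection
-- ===== SOURCE B (Python) =====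
-- def _find_twin_and_intersections(group_idx, all_urls_sets):
--     """Find if group has twins or intersecting URLs"""
--     current_set = all_urls_sets[group_idx]
--     others = [s for i, s in enumerate(all_urls_sets) if i != group_idx]
--     has_twin = current_set in others
--     union = set().union(*others)
--     has_intersection = not current_set.isdisjoint(union)
--     return has_twin, has_intersection
-- ===== Notes on version B (the rewrite author's own statement) =====
-- stated objective: alternative
-- what changed: Replaces A's single pass with per-other-set equality and intersection tests (and an early break) by materialising the list of other sets, testing twin via list membership, and pre-aggregating all other sets into one union so intersection is a single isdisjoint check.
import Mathlib
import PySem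

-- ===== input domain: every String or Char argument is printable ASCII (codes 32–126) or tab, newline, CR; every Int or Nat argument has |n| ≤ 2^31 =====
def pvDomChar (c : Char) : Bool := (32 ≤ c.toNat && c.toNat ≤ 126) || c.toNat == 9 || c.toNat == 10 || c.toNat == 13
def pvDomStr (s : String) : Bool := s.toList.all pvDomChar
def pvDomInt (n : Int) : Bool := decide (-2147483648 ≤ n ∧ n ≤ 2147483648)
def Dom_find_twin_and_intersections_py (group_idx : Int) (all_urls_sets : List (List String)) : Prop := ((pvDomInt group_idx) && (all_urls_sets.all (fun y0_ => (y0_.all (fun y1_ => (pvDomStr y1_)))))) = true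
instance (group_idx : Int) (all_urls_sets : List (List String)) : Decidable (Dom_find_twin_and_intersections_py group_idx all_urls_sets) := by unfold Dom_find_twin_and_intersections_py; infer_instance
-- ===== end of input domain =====

-- B replaces A's per-set equality+intersection loop (with early break) by a list-membership
-- twin test and one isdisjoint check against the pre-aggregated union of all other sets (alternative decomposition).

-- ===== PORT A =====
-- the for-loop with its early 'break'; state = (has_twin, has_intersection)
def pvALoop (group_idx : Int) (current : List String) :
    List (Int × List String) → Bool → Bool → Bool × Bool
  | [], t, i => (t, i)
  | (other_idx, other) :: rest, t, i =>
    if other_idx ≠ group_idx then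
      let t := if PySem.Set.equal current other then true else t
      let i := if !(PySem.Set.inter current other).isEmpty then true else i
      if t && i then (t, i) else pvALoop group_idx current rest t i
    else pvALoop group_idx current rest t i

def find_twin_and_intersections_py (group_idx : Int) (all_urls_sets : List (List String)) : Bool × Bool :=
  -- all_urls_sets[group_idx]: total form pyGetD, admitted by Pre_ (InRange)
  let current := PySem.List.pyGetD all_urls_sets group_idx []
  pvALoop group_idx current (PySem.List.enumerate all_urls_sets) false false

-- ===== PORT B =====
def find_twin_and_intersections_py_alt (group_idx : Int) (all_urls_sets : List (List String)) : Bool × Bool :=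
  let current := PySem.List.pyGetD all_urls_sets group_idx []
  let others := (PySem.List.enumerate all_urls_sets).filterMap
    (fun p => if p.1 ≠ group_idx then some p.2 else none)
  -- 'current_set in others': Python list membership compares with ==, i.e. set equality
  let has_twin := others.any (fun o => PySem.Set.equal current o)
  let union := others.foldl (fun u o => PySem.Set.union u o) PySem.Set.empty
  let has_intersection := !(PySem.Set.isdisjoint current union)
  (has_twin, has_intersection)

-- ===== PRECONDITION & SPEC =====
-- Pre_: the index must be in range (Python raises IndexError otherwise)
def Pre_find_twin_and_intersections_py (group_idx : Int) (all_urls_sets : List (List String)) : Prop :=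
  PySem.Raise.InRange all_urls_sets.length group_idx
instance (group_idx : Int) (all_urls_sets : List (List String)) : Decidable (Pre_find_twin_and_intersections_py group_idx all_urls_sets) := by unfold Pre_find_twin_and_intersections_py; infer_instance
def pvWitness_find_twin_and_intersections_py : Int × List (List String) := (0, [["a"], ["a", "b"]])

def Spec_find_twin_and_intersections_py (group_idx : Int) (all_urls_sets : List (List String)) (out : Bool × Bool) : Prop := out = find_twin_and_intersections_py_alt group_idx all_urls_sets
instance (group_idx : Int) (all_urls_sets : List (List String)) (out : Bool × Bool) : Decidable (Spec_find_twin_and_intersections_py group_idx all_urls_sets out) := by unfold Spec_find_twin_and_intersections_py; infer_instance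

-- ===== CLAIM (what is proved, stated in full; the proofs are below) =====
def Claim_equal_find_twin_and_intersections_py : Prop := ∀ (group_idx : Int) (all_urls_sets : List (List String)), Dom_find_twin_and_intersections_py group_idx all_urls_sets → Pre_find_twin_and_intersections_py group_idx all_urls_sets → Spec_find_twin_and_intersections_py group_idx all_urls_sets (find_twin_and_intersections_py group_idx all_urls_sets)

-- ===== LEMMAS AND PROOFS =====

-- the list of other groups' sets, as B builds it
def pvOthers (group_idx : Int) (l : List (Int × List String)) : List (List String) :=
  l.filterMap (fun p => if p.1 ≠ group_idx then some p.2 else none)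

-- A's loop computes the two 'any's over the other sets, break notwithstanding
theorem pvALoop_eq (group_idx : Int) (current : List String)
    (l : List (Int × List String)) (t i : Bool) :
    pvALoop group_idx current l t i =
      (t || (pvOthers group_idx l).any (fun o => PySem.Set.equal current o),
       i || (pvOthers group_idx l).any (fun o => !(PySem.Set.inter current o).isEmpty)) := by
  induction l generalizing t i with
  | nil => simp [pvALoop, pvOthers]
  | cons p rest ih =>
    obtain ⟨idx, o⟩ := p
    by_cases h : idx ≠ group_idx
    · have hk : pvOthers group_idx ((idx, o) :: rest) = o :: pvOthers group_idx rest := by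
        simp [pvOthers, h]
      rw [hk]
      simp only [pvALoop, if_pos h, List.any_cons]
      set A1 := (pvOthers group_idx rest).any (fun o => PySem.Set.equal current o) with hA1
      set A2 := (pvOthers group_idx rest).any (fun o => !(PySem.Set.inter current o).isEmpty) with hA2
      by_cases hb : ((if PySem.Set.equal current o then true else t) &&
          (if !(PySem.Set.inter current o).isEmpty then true else i)) = true
      · rw [if_pos hb]
        revert hb
        cases PySem.Set.equal current o <;> cases !(PySem.Set.inter current o).isEmpty <;>
          cases t <;> cases i <;> simp
      · rw [if_neg hb, ih]
        cases PySem.Set.equal current o <;> cases !(PySem.Set.inter current o).isEmpty <;>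
          cases t <;> cases i <;> simp
    · have hs : pvOthers group_idx ((idx, o) :: rest) = pvOthers group_idx rest := by
        simp [pvOthers, h]
      rw [hs]
      simp only [pvALoop, if_neg h]
      exact ih t i

-- membership in the left fold of unions
theorem pv_mem_foldl_union (others : List (List String)) (s : List String) (x : String) :
    x ∈ others.foldl (fun u o => PySem.Set.union u o) s ↔ x ∈ s ∨ ∃ o ∈ others, x ∈ o := by
  induction others generalizing s with
  | nil => simp
  | cons o rest ih =>
    simp only [List.foldl_cons, ih, PySem.Set.mem_union, List.mem_cons]
    constructor
    · rintro ((h | h) | ⟨o', ho', hx⟩)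
      · exact Or.inl h
      · exact Or.inr ⟨o, Or.inl rfl, h⟩
      · exact Or.inr ⟨o', Or.inr ho', hx⟩
    · rintro (h | ⟨o', (rfl | ho'), hx⟩)
      · exact Or.inl (Or.inl h)
      · exact Or.inl (Or.inr hx)
      · exact Or.inr ⟨o', ho', hx⟩

-- 'not isdisjoint with the union' = 'some other set intersects'
theorem pv_isdisjoint_union (current : List String) (others : List (List String)) :
    (!(PySem.Set.isdisjoint current
        (others.foldl (fun u o => PySem.Set.union u o) PySem.Set.empty))) =
      others.any (fun o => !(PySem.Set.inter current o).isEmpty) := by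
  rw [Bool.eq_iff_iff]
  calc (!(PySem.Set.isdisjoint current
        (others.foldl (fun u o => PySem.Set.union u o) PySem.Set.empty))) = true
      ↔ ¬ (PySem.Set.isdisjoint current
        (others.foldl (fun u o => PySem.Set.union u o) PySem.Set.empty) = true) := by
        cases PySem.Set.isdisjoint current
          (others.foldl (fun u o => PySem.Set.union u o) PySem.Set.empty) <;> simp
    _ ↔ ¬ ∀ x ∈ current, x ∉ others.foldl (fun u o => PySem.Set.union u o) PySem.Set.empty := by
        rw [PySem.Set.isdisjoint_iff]
    _ ↔ ∃ x ∈ current, ∃ o ∈ others, x ∈ o := by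
        push_neg
        simp only [pv_mem_foldl_union, PySem.Set.empty]
        simp
    _ ↔ ∃ o ∈ others, ∃ x ∈ current, x ∈ o := by
        constructor
        · rintro ⟨x, hx, o, ho, hxo⟩; exact ⟨o, ho, x, hx, hxo⟩
        · rintro ⟨o, ho, x, hx, hxo⟩; exact ⟨x, hx, o, ho, hxo⟩
    _ ↔ others.any (fun o => !(PySem.Set.inter current o).isEmpty) = true := by
        simp only [List.any_eq_true]
        constructor
        · rintro ⟨o, ho, x, hx, hxo⟩
          refine ⟨o, ho, ?_⟩
          simp only [Bool.not_eq_eq_eq_not, Bool.not_true, List.isEmpty_eq_false_iff_exists_mem]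
          exact ⟨x, (PySem.Set.mem_inter current o x).mpr ⟨hx, hxo⟩⟩
        · rintro ⟨o, ho, hne⟩
          simp only [Bool.not_eq_eq_eq_not, Bool.not_true,
            List.isEmpty_eq_false_iff_exists_mem] at hne
          obtain ⟨x, hx⟩ := hne
          obtain ⟨hxc, hxo⟩ := (PySem.Set.mem_inter current o x).mp hx
          exact ⟨o, ho, x, hxc, hxo⟩

-- ===== VERDICT (by name: the statement is the Claim_ definition above) =====
theorem find_twin_and_intersections_py_spec : Claim_equal_find_twin_and_intersections_py := by
  intro group_idx all_urls_sets _ _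
  unfold Spec_find_twin_and_intersections_py
  unfold find_twin_and_intersections_py find_twin_and_intersections_py_alt
  rw [pvALoop_eq]
  simp only [Bool.false_or]
  rw [pv_isdisjoint_union]
  rfl
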